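-- pv_equiv track=rewrite | github.com/Dhruvq/Apollo-AI-Research-Analyst | pipeline/filters.py | _author_boost
-- ===== SOURCE A (Python) =====
-- def _author_boost(authors: list[str], author_lookup: dict[str, int]) -> int:
--     """
--     For each paper author, check if any high-impact author name is a
--     case-insensitive substring of the author string.
--     Returns sum of all matched author boost weights.
--     """
--     boost = 0
--     for author in authors:
--         author_lower = author.lower()
--         for known_name, weight in author_lookup.items():
--             if known_name in author_lower:
--                 boost += weight
--                 break  # count each paper author at most once
--     return boost
-- ===== SOURCE B (Python) =====
-- def _author_boost(authors: list[str], author_lookup: dict[str, int]) -> int: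
--     # Inverted loop nesting: lower each author once, then sweep the lookup in
--     # order, crediting and removing each still-unmatched author at its first match.
--     boost = 0
--     remaining = [a.lower() for a in authors]
--     for known_name, weight in author_lookup.items():
--         still = []
--         for a in remaining:
--             if known_name in a:
--                 boost += weight
--             else:
--                 still.append(a)
--         remaining = still
--     return boost
-- ===== Notes on version B (the rewrite author's own statement) =====
-- stated objective: alternative
-- what changed: B inverts the loop nesting: it lowers every author once up front, then sweeps the lookup entries in the outer loop, crediting each still-unmatched author at its first matching entry and dropping it from the working list, instead of A's per-author scan of the whole lookup with a break.
import Mathlib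
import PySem

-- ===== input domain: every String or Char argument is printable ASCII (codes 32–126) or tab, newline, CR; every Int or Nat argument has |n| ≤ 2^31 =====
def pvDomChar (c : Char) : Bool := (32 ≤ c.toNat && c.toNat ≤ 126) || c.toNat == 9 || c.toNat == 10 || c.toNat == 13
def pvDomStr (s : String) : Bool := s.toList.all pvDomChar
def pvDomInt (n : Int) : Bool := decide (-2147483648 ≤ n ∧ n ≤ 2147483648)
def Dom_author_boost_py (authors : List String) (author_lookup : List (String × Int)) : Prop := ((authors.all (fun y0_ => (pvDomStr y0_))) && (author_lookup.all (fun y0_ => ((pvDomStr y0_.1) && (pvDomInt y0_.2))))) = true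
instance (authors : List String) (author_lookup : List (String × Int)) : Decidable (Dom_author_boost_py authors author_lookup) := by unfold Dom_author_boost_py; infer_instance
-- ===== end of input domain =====

-- B inverts the loop nesting: it lowers each author once, then sweeps the lookup in order,
-- crediting and removing each still-unmatched author at its first match (objective: alternative).


-- ===== PORT A =====
-- inner 'for known_name, weight in author_lookup.items(): … break' loop of A
def pvAInner (author_lower : String) : List (String × Int) → Int → Int
  | [], boost => boost
  | (known_name, weight) :: rest, boost =>
      if PySem.Str.isIn known_name author_lower then boost + weight
      else pvAInner author_lower rest boost

def author_boost_py (authors : List String) (author_lookup : List (String × Int)) : Int :=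
  authors.foldl (fun boost author => pvAInner (PySem.Str.lower author) author_lookup boost) 0

-- ===== PORT B =====
-- body of B's outer loop: one sweep over the remaining lowered authors for one lookup entry
def pvBStep (st : Int × List String) (kw : String × Int) : Int × List String :=
  st.2.foldl
    (fun (st2 : Int × List String) a =>
      if PySem.Str.isIn kw.1 a then (st2.1 + kw.2, st2.2)
      else (st2.1, st2.2 ++ [a]))
    (st.1, [])

def author_boost_py_alt (authors : List String) (author_lookup : List (String × Int)) : Int :=
  let remaining := authors.map PySem.Str.lower
  (author_lookup.foldl pvBStep (0, remaining)).1

-- ===== PRECONDITION & SPEC =====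
def Spec_author_boost_py (authors : List String) (author_lookup : List (String × Int)) (out : Int) : Prop := out = author_boost_py_alt authors author_lookup
instance (authors : List String) (author_lookup : List (String × Int)) (out : Int) : Decidable (Spec_author_boost_py authors author_lookup out) := by unfold Spec_author_boost_py; infer_instance

-- ===== CLAIM (what is proved, stated in full; the proofs are below) =====
def Claim_equal_author_boost_py : Prop := ∀ (authors : List String) (author_lookup : List (String × Int)), Dom_author_boost_py authors author_lookup → Spec_author_boost_py authors author_lookup (author_boost_py authors author_lookup)

-- ===== LEMMAS AND PROOFS =====

-- weight of the first lookup entry matching the (already lowered) author, 0 if none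
def pvFirstW (al : String) : List (String × Int) → Int
  | [] => 0
  | (k, w) :: rest => if PySem.Str.isIn k al then w else pvFirstW al rest

-- sum of first-match weights over a list of lowered authors
def pvS (rem : List String) (lookup : List (String × Int)) : Int :=
  (rem.map (fun a => pvFirstW a lookup)).sum

theorem pvAInner_eq (al : String) (l : List (String × Int)) (b : Int) :
    pvAInner al l b = b + pvFirstW al l := by
  induction l generalizing b with
  | nil => simp [pvAInner, pvFirstW]
  | cons kw rest ih =>
      obtain ⟨k, w⟩ := kw
      simp only [pvAInner, pvFirstW]
      split <;> simp [ih]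

theorem pvA_eq (authors : List String) (lookup : List (String × Int)) (b : Int) :
    authors.foldl (fun boost author => pvAInner (PySem.Str.lower author) lookup boost) b
      = b + pvS (authors.map PySem.Str.lower) lookup := by
  induction authors generalizing b with
  | nil => simp [pvS]
  | cons a t ih =>
      simp only [List.foldl_cons]
      rw [pvAInner_eq, ih]
      simp only [pvS, List.map_cons, List.sum_cons]
      ring

-- one sweep with an arbitrary match predicate: adds w per match, keeps non-matches in order
theorem pvSweep_eq (p : String → Bool) (w : Int) (rem : List String) (b : Int) (acc : List String) :
    rem.foldl
        (fun (st2 : Int × List String) a =>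
          if p a then (st2.1 + w, st2.2)
          else (st2.1, st2.2 ++ [a])) (b, acc)
      = (b + (rem.map (fun a => if p a then w else 0)).sum,
         acc ++ rem.filter (fun a => !p a)) := by
  induction rem generalizing b acc with
  | nil => simp
  | cons a t ih =>
      cases h : p a <;> simp [h, ih, add_assoc]

theorem pvBStep_eq (b : Int) (rem : List String) (k : String) (w : Int) :
    pvBStep (b, rem) (k, w)
      = (b + (rem.map (fun a => if PySem.Str.isIn k a then w else 0)).sum,
         rem.filter (fun a => !PySem.Str.isIn k a)) := by
  rw [pvBStep, pvSweep_eq]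
  simp only [List.nil_append]

-- the sum of an if-then-else map splits into matched weights plus the rest
theorem pvSum_split (p : String → Bool) (w : Int) (f : String → Int) (rem : List String) :
    (rem.map (fun a => if p a then w else f a)).sum
      = (rem.map (fun a => if p a then w else 0)).sum
        + ((rem.filter (fun a => !p a)).map f).sum := by
  induction rem with
  | nil => simp
  | cons a t ih =>
      cases h : p a <;> simp [h, ih] <;> ring

-- splitting pvS at the head lookup entry
theorem pvS_cons (rem : List String) (k : String) (w : Int) (t : List (String × Int)) :
    pvS rem ((k, w) :: t)
      = (rem.map (fun a => if PySem.Str.isIn k a then w else 0)).sum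
        + pvS (rem.filter (fun a => !PySem.Str.isIn k a)) t := by
  unfold pvS
  have : (fun a => pvFirstW a ((k, w) :: t))
       = fun a => if PySem.Str.isIn k a then w else pvFirstW a t := by
    funext a; rfl
  rw [this, pvSum_split (fun a => PySem.Str.isIn k a) w (fun a => pvFirstW a t) rem]

-- B's outer fold invariant
theorem pvB_inv (lookup : List (String × Int)) (rem : List String) (b : Int) :
    (lookup.foldl pvBStep (b, rem)).1 = b + pvS rem lookup := by
  induction lookup generalizing rem b with
  | nil => simp [pvS, pvFirstW]
  | cons kw t ih =>
      obtain ⟨k, w⟩ := kw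
      rw [List.foldl_cons, pvBStep_eq, ih, pvS_cons, add_assoc]

-- ===== VERDICT (by name: the statement is the Claim_ definition above) =====
theorem author_boost_py_spec : Claim_equal_author_boost_py := by
  intro authors author_lookup _
  unfold Spec_author_boost_py author_boost_py author_boost_py_alt
  rw [pvA_eq, pvB_inv]
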